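-- pv_equiv track=rewrite | github.com/shfcheung/named-entity-recognizer | namedentityrecognizer.py | __format_tagged_tokens
-- ===== SOURCE A (Python) =====
-- def __format_tagged_tokens(tuple_list):
--
--     """
--     A function to transform the outputs (in the form of a list of tuples)
--     from Stanford NER to string object.
--
--     INPUTS:
--         tuple_list: a list of (token, entity) tuples
--     RETURNS:
--         output_text: string object
--     """
--
--     # unzip the tuple_list to token_tuple and ent_tuple respectively
--     (token_tuple, ent_tuple) = list(zip(*tuple_list))
--
--     # a dictionary that maps index numbers (idx) to tokens, adjacent tokens
--     # with the same entity tag are sharing the same index number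
--     idx_to_token_map = {}
--     # a dictionary that maps index numbers (idx) to entities(ent), adjacent
--     # entity tags (which are the same) are sharing the same index number
--     idx_to_ent_map = {}
--     output_token_list = [] # an empty list to keep the formatted tokens
--
--     i = 0
--     # add first token to idx_to_token_map with index number 0
--     idx_to_token_map[0] = token_tuple[i]
--     # add first entity tag to idx_to_ent_map with index number 0
--     idx_to_ent_map[0] = ent_tuple[i].capitalize()
--
--
--     # if the entity tag of the current and previous tokens are the same,
--     # concatenate the current token to previous token (separated by a space
--     # character) in 'idx_to_token_map', otherwise (1) increase the index
--     # number in idx_to_token_map by 1 and attach the token to the updated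
--     # index number; and (2) increase the index nymber in idx_to_ent_map by
--     # 1 and attach the entity tag to the updated index number
--     for j in range(1, len(token_tuple)):
--         if ent_tuple[j] == ent_tuple[j-1]:
--             idx_to_token_map[i] = idx_to_token_map[i] + ' ' + token_tuple[j]
--         else:
--             i += 1
--             idx_to_token_map[i] = token_tuple[j]
--             idx_to_ent_map[i] = ent_tuple[j].capitalize()
--
--     # formats the tokens belonging to 'Person', 'Organization'
--     # or 'Location' entity in the form of '<EntityTag>tokens</EntityTag>'
--     for k in range(len(idx_to_token_map)):
--         if idx_to_ent_map[k] in ['Person', 'Organization', 'Location']: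
--             concated_token = '<' + idx_to_ent_map[k] + '>' + \
--             idx_to_token_map[k] + '</' + idx_to_ent_map[k] + '>'
--             output_token_list.append(concated_token)
--         else:
--             output_token_list.append(idx_to_token_map[k])
--
--     # join the formatted tokens by spcae character
--     output_text = ' '.join(output_token_list)
--
--     return output_text
-- ===== SOURCE B (Python) =====
-- def _wrap(text, ent):
--     """Format one group of tokens: wrap in <Tag>...</Tag> for the three NER tags."""
--     tag = ent.capitalize()
--     if tag in ('Person', 'Organization', 'Location'):
--         return '<' + tag + '>' + text + '</' + tag + '>'
--     return text
--
--
-- def __format_tagged_tokens(tuple_list):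
--     # unzip kept so that an empty tuple_list still raises ValueError like the original
--     (token_tuple, ent_tuple) = list(zip(*tuple_list))
--
--     pieces = []
--     cur_text = token_tuple[0]
--     cur_ent = ent_tuple[0]
--     # single pass: emit each group as soon as it closes
--     for token, ent in tuple_list[1:]:
--         if ent == cur_ent:
--             cur_text += ' ' + token
--         else:
--             pieces.append(_wrap(cur_text, cur_ent))
--             cur_text, cur_ent = token, ent
--     pieces.append(_wrap(cur_text, cur_ent))
--     return ' '.join(pieces)
-- ===== Notes on version B (the rewrite author's own statement) =====
-- stated objective: simpler
-- what changed: Replaced the two integer-keyed dicts plus a second index loop with a single pass that joins each run of same-entity tokens as it closes and wraps it via one helper; Pre_ excludes the empty list, on which A's zip-unpack raises ValueError (B keeps the unzip and raises too).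
import Mathlib
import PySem

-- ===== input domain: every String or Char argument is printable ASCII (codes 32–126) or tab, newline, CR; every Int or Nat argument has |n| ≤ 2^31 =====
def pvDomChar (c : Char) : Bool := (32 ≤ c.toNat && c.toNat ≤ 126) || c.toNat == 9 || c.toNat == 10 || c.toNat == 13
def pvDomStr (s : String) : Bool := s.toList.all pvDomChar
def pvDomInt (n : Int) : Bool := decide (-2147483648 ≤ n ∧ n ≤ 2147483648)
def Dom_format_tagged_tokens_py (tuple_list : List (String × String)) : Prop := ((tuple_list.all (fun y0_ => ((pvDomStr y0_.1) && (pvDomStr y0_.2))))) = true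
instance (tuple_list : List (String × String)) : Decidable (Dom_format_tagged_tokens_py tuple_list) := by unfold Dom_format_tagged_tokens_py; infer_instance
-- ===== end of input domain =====

-- B replaces A's two integer-keyed dicts and second index loop with a single pass that
-- emits each same-entity run as it closes (objective: simpler).

-- str.capitalize(): first char upper-cased, rest lowered — exact on the ASCII domain
-- (Python title-cases the first char; titlecase = uppercase for ASCII).
def pyCapitalize (s : String) : String :=
  match s.toList with
  | [] => ""
  | c :: cs => String.ofList (PySem.Chars.upperChar c :: PySem.Chars.lower cs)

-- ===== PORT A =====
-- dict[i] accesses in A always hit existing keys (0..i), so KeyError cannot occur: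
-- they are ported as getD with an unreachable default "".
def format_tagged_tokens_py (tuple_list : List (String × String)) : String :=
  match tuple_list with
  | [] => ""  -- zip(*tuple_list) raises ValueError here (excluded by Pre_)
  | _ :: _ =>
    let token_tuple := tuple_list.map Prod.fst
    let ent_tuple := tuple_list.map Prod.snd
    let st :=
      (PySem.List.pyRange 1 (PySem.List.len token_tuple)).foldl
        (fun (s : Int × PySem.Dict Int String × PySem.Dict Int String) j =>
          if PySem.List.pyGetD ent_tuple j "" == PySem.List.pyGetD ent_tuple (j - 1) "" then
            (s.1, s.2.1.insert s.1 (s.2.1.getD s.1 "" ++ " " ++ PySem.List.pyGetD token_tuple j ""), s.2.2)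
          else
            (s.1 + 1, s.2.1.insert (s.1 + 1) (PySem.List.pyGetD token_tuple j ""),
              s.2.2.insert (s.1 + 1) (pyCapitalize (PySem.List.pyGetD ent_tuple j ""))))
        (0, (PySem.Dict.empty : PySem.Dict Int String).insert 0 (PySem.List.pyGetD token_tuple 0 ""),
            (PySem.Dict.empty : PySem.Dict Int String).insert 0 (pyCapitalize (PySem.List.pyGetD ent_tuple 0 "")))
    let output_token_list :=
      (PySem.List.pyRange 0 ((st.2.1.size : Int))).foldl
        (fun (acc : List String) k =>
          if (["Person", "Organization", "Location"] : List String).contains (st.2.2.getD k "") then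
            acc ++ ["<" ++ st.2.2.getD k "" ++ ">" ++ st.2.1.getD k "" ++ "</" ++ st.2.2.getD k "" ++ ">"]
          else
            acc ++ [st.2.1.getD k ""])
        []
    PySem.Str.join " " output_token_list

-- ===== PORT B =====
-- Source B's _wrap helper
def wrapTag (text : String) (ent : String) : String :=
  let tag := pyCapitalize ent
  if (["Person", "Organization", "Location"] : List String).contains tag then
    "<" ++ tag ++ ">" ++ text ++ "</" ++ tag ++ ">"
  else text

def format_tagged_tokens_py_alt (tuple_list : List (String × String)) : String :=
  match tuple_list with
  | [] => ""  -- the kept unzip raises ValueError here (excluded by Pre_)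
  | (t0, e0) :: rest =>
    let st := rest.foldl
      (fun (s : List String × String × String) te =>
        if te.2 == s.2.2 then (s.1, s.2.1 ++ " " ++ te.1, s.2.2)
        else (s.1 ++ [wrapTag s.2.1 s.2.2], te.1, te.2))
      ([], t0, e0)
    PySem.Str.join " " (st.1 ++ [wrapTag st.2.1 st.2.2])

-- ===== PRECONDITION & SPEC =====
-- Pre_ excludes only the empty list, on which A's 'zip(*tuple_list)' unpack raises ValueError
-- (B keeps the unzip and raises there too).
def Pre_format_tagged_tokens_py (tuple_list : List (String × String)) : Prop := tuple_list ≠ []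
instance (tuple_list : List (String × String)) : Decidable (Pre_format_tagged_tokens_py tuple_list) := by unfold Pre_format_tagged_tokens_py; infer_instance
def pvWitness_format_tagged_tokens_py : (List (String × String)) := [("Alice", "PERSON")]

def Spec_format_tagged_tokens_py (tuple_list : List (String × String)) (out : String) : Prop := out = format_tagged_tokens_py_alt tuple_list
instance (tuple_list : List (String × String)) (out : String) : Decidable (Spec_format_tagged_tokens_py tuple_list out) := by unfold Spec_format_tagged_tokens_py; infer_instance

-- ===== CLAIM (what is proved, stated in full; the proofs are below) =====
def Claim_equal_format_tagged_tokens_py : Prop := ∀ (tuple_list : List (String × String)), Dom_format_tagged_tokens_py tuple_list → Pre_format_tagged_tokens_py tuple_list → Spec_format_tagged_tokens_py tuple_list (format_tagged_tokens_py tuple_list)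

-- ===== LEMMAS AND PROOFS =====

-- the list of (joined-tokens, raw-entity) runs of consecutive same-entity tokens
def groupsGo (cur : String × String) : List (String × String) → List (String × String)
  | [] => [cur]
  | (t, e) :: rest =>
    if e == cur.2 then groupsGo (cur.1 ++ " " ++ t, cur.2) rest
    else cur :: groupsGo (t, e) rest

-- a fold that also hands each step the PREVIOUS element
def foldPrev {σ α : Type} (F : σ → α → α → σ) : σ → α → List α → σ
  | s, _, [] => s
  | s, prev, y :: ys => foldPrev F (F s y prev) y ys

-- the dict {0: vs[0], 1: vs[1], …}
def dOf (vs : List String) : PySem.Dict Int String := PySem.Dict.mk (PySem.List.enumerate vs 0)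

-- A's loop step, reformulated on (current element, previous element)
def stepA (s : Int × PySem.Dict Int String × PySem.Dict Int String)
    (y prev : String × String) : Int × PySem.Dict Int String × PySem.Dict Int String :=
  if y.2 == prev.2 then
    (s.1, s.2.1.insert s.1 (s.2.1.getD s.1 "" ++ " " ++ y.1), s.2.2)
  else
    (s.1 + 1, s.2.1.insert (s.1 + 1) y.1, s.2.2.insert (s.1 + 1) (pyCapitalize y.2))

-- A's dict state as a function of the runs seen so far
def stateOf (all : List (String × String)) : Int × PySem.Dict Int String × PySem.Dict Int String :=
  ((all.length : Int) - 1, dOf (all.map (·.1)), dOf (all.map (fun p => pyCapitalize p.2)))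

lemma dOf_contains_len (vs : List String) : (dOf vs).contains ((vs.length : Int)) = false := by
  simp only [dOf, PySem.Dict.contains_mk, List.any_eq_false]
  rintro ⟨a, b⟩ hp
  rcases (PySem.List.mem_enumerate_iff _ _ _).1 hp with ⟨k, hk, hpe⟩
  simp at hpe
  simp [hpe.1]
  omega

lemma dOf_insert_len (vs : List String) (v : String) :
    (dOf vs).insert ((vs.length : Int)) v = dOf (vs ++ [v]) := by
  apply PySem.Dict.ext
  rw [PySem.Dict.items_insert_of_not_contains _ _ (dOf_contains_len vs)]
  simp [dOf, PySem.List.enumerate_append, PySem.List.enumerate_cons]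

lemma dOf_contains_last (vs : List String) (w : String) :
    (dOf (vs ++ [w])).contains ((vs.length : Int)) = true := by
  simp only [dOf, PySem.Dict.contains_mk, PySem.List.enumerate_append,
    PySem.List.enumerate_cons, PySem.List.enumerate_nil, List.any_append]
  simp

lemma dOf_overwrite_last (vs : List String) (w v : String) :
    (dOf (vs ++ [w])).insert ((vs.length : Int)) v = dOf (vs ++ [v]) := by
  have h : ∀ p ∈ PySem.List.enumerate vs 0,
      (if (p.1 == (vs.length : Int)) = true then ((vs.length : Int), v) else p) = p := by
    rintro ⟨a, b⟩ hp
    rcases (PySem.List.mem_enumerate_iff _ _ _).1 hp with ⟨k, hk, hpe⟩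
    simp at hpe
    simp [hpe.1]
    omega
  apply PySem.Dict.ext
  rw [PySem.Dict.items_insert_of_contains _ _ (dOf_contains_last vs w)]
  simp only [dOf, PySem.List.enumerate_append, PySem.List.enumerate_cons,
    PySem.List.enumerate_nil, List.map_append]
  congr 1
  · calc _ = (PySem.List.enumerate vs 0).map id := List.map_congr_left h
      _ = _ := List.map_id _
  · simp

lemma get?_enumMk (vs : List String) : ∀ (s : Int) (k : Nat),
    (PySem.Dict.mk (PySem.List.enumerate vs s)).get? (s + (k : Int)) = vs[k]? := by
  induction vs with
  | nil => intro s k; simp [PySem.List.enumerate_nil, PySem.Dict.get?]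
  | cons v vs ih =>
    intro s k
    rw [PySem.List.enumerate_cons]
    cases k with
    | zero => simp [PySem.Dict.get?_mk_cons]
    | succ k =>
      rw [PySem.Dict.get?_mk_cons]
      have h1 : (s == s + ((k : Nat) + 1 : Nat)) = false := by simp; omega
      rw [if_neg (by simp_all)]
      have := ih (s + 1) k
      have harg : s + 1 + (k : Int) = s + ((k : Nat) + 1 : Nat) := by push_cast; ring
      rw [harg] at this
      rw [this]
      simp

lemma getD_dOf (vs : List String) (k : Nat) (d : String) :
    (dOf vs).getD ((k : Int)) d = vs.getD k d := by
  have := get?_enumMk vs 0 k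
  simp only [zero_add] at this
  rw [PySem.Dict.getD, dOf, this, List.getD_eq_getElem?_getD]

lemma size_dOf (vs : List String) : (dOf vs).size = vs.length := by
  simp [dOf, PySem.Dict.size, PySem.List.length_enumerate]

lemma getD_append_last (xs : List String) (x d : String) : (xs ++ [x]).getD xs.length d = x := by
  simp [List.getD_eq_getElem?_getD]

lemma foldl_pyRange_prev {σ α : Type} (F : σ → α → α → σ) (d : α) :
    ∀ (ys : List α) (y0 : α) (s : σ),
    (PySem.List.pyRange 1 (((y0 :: ys).length : Int))).foldl
      (fun s j => F s (PySem.List.pyGetD (y0 :: ys) j d) (PySem.List.pyGetD (y0 :: ys) (j - 1) d)) s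
    = foldPrev F s y0 ys := by
  intro ys
  induction ys with
  | nil =>
    intro y0 s
    rw [PySem.List.pyRange_one_eq_nil (by simp)]
    rfl
  | cons y1 ys ih =>
    intro y0 s
    have hlen : (((y0 :: y1 :: ys).length : Nat) : Int) = (ys.length : Int) + 2 := by
      simp [List.length_cons]; omega
    rw [hlen, PySem.List.pyRange_one_cons (by omega)]
    rw [List.foldl_cons]
    have hfirst : F s (PySem.List.pyGetD (y0 :: y1 :: ys) 1 d) (PySem.List.pyGetD (y0 :: y1 :: ys) (1 - 1) d) = F s y1 y0 := by
      norm_num [PySem.List.pyGetD_ofNat', List.getD]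
    rw [hfirst]
    have ih' := ih y1 (F s y1 y0)
    have hlen2 : (((y1 :: ys).length : Nat) : Int) = (ys.length : Int) + 1 := by simp [List.length_cons]
    rw [hlen2] at ih'
    rw [show foldPrev F s y0 (y1 :: ys) = foldPrev F (F s y1 y0) y1 ys from rfl, ← ih']
    -- both ranges as maps over List.range ys.length
    rw [show (1 : Int) + 1 = 2 from rfl]
    have h1 : PySem.List.pyRange 2 ((ys.length : Int) + 2) =
        List.map (fun k : Nat => 2 + (k : Int)) (List.range ys.length) := by
      rw [PySem.List.pyRange_one]
      have h : ((ys.length : Int) + 2 - 2).toNat = ys.length := by omega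
      rw [h]
    have h2 : PySem.List.pyRange 1 ((ys.length : Int) + 1) =
        List.map (fun k : Nat => 1 + (k : Int)) (List.range ys.length) := by
      rw [PySem.List.pyRange_one]
      have h : ((ys.length : Int) + 1 - 1).toNat = ys.length := by omega
      rw [h]
    rw [h1, h2, List.foldl_map, List.foldl_map]
    apply PySem.List.foldl_congr_mem
    intro acc k _
    have e1 : PySem.List.pyGetD (y0 :: y1 :: ys) (2 + (k : Int)) d = PySem.List.pyGetD (y1 :: ys) (1 + (k : Int)) d := by
      have : (2 + (k : Int)) = ((k + 2 : Nat) : Int) := by push_cast; ring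
      rw [this, PySem.List.pyGetD_natCast]
      have : (1 + (k : Int)) = ((k + 1 : Nat) : Int) := by push_cast; ring
      rw [this, PySem.List.pyGetD_natCast]
      rfl
    have e2 : PySem.List.pyGetD (y0 :: y1 :: ys) (2 + (k : Int) - 1) d = PySem.List.pyGetD (y1 :: ys) (1 + (k : Int) - 1) d := by
      have h3 : (2 + (k : Int) - 1) = ((k + 1 : Nat) : Int) := by push_cast; ring
      have h4 : (1 + (k : Int) - 1) = ((k : Nat) : Int) := by omega
      rw [h3, PySem.List.pyGetD_natCast, h4, PySem.List.pyGetD_natCast]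
      rfl
    rw [e1, e2]

lemma foldPrev_stepA (ys : List (String × String)) : ∀ (prev cur : String × String)
    (gs : List (String × String)), cur.2 = prev.2 →
    foldPrev stepA (stateOf (gs ++ [cur])) prev ys = stateOf (gs ++ groupsGo cur ys) := by
  induction ys with
  | nil => intro prev cur gs _; rfl
  | cons te ys ih =>
    obtain ⟨t, e⟩ := te
    intro prev cur gs hpc
    rw [show foldPrev stepA (stateOf (gs ++ [cur])) prev ((t, e) :: ys)
        = foldPrev stepA (stepA (stateOf (gs ++ [cur])) (t, e) prev) (t, e) ys from rfl]
    have hfst : (gs ++ [cur]).map (·.1) = gs.map (·.1) ++ [cur.1] := by simp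
    have hlen : ((gs ++ [cur]).length : Int) - 1 = ((gs.map (·.1)).length : Nat) := by
      simp
    by_cases h : e = cur.2
    · -- same entity: extend the current run
      have hcond : ((t, e).2 == prev.2) = true := by simp [← hpc, h]
      have hstep : stepA (stateOf (gs ++ [cur])) (t, e) prev
          = stateOf (gs ++ [(cur.1 ++ " " ++ t, cur.2)]) := by
        simp only [stepA, hcond, if_pos]
        unfold stateOf
        rw [hfst, hlen]
        rw [getD_dOf, getD_append_last, dOf_overwrite_last]
        simp
      rw [hstep]
      have hg : groupsGo cur ((t, e) :: ys) = groupsGo (cur.1 ++ " " ++ t, cur.2) ys := by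
        simp [groupsGo, h]
      rw [hg]
      exact ih (t, e) (cur.1 ++ " " ++ t, cur.2) gs (by simp [h])
    · -- new entity: open a new run
      have hcond : ((t, e).2 == prev.2) = false := by simp [← hpc, h]
      have hstep : stepA (stateOf (gs ++ [cur])) (t, e) prev
          = stateOf ((gs ++ [cur]) ++ [(t, e)]) := by
        simp only [stepA, hcond, Bool.false_eq_true, if_neg, not_false_iff]
        unfold stateOf
        have h1 : ((gs ++ [cur]).length : Int) - 1 + 1 = (((gs ++ [cur]).map (·.1)).length : Nat) := by simp
        rw [h1, dOf_insert_len]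
        have h2 : (((gs ++ [cur]).map (·.1)).length : Int) = (((gs ++ [cur]).map (fun p => pyCapitalize p.2)).length : Nat) := by simp
        rw [h2, dOf_insert_len]
        simp
        omega
      rw [hstep]
      have hg : groupsGo cur ((t, e) :: ys) = cur :: groupsGo (t, e) ys := by
        simp [groupsGo, h]
      rw [hg, show gs ++ (cur :: groupsGo (t, e) ys) = (gs ++ [cur]) ++ groupsGo (t, e) ys by simp]
      exact ih (t, e) (t, e) (gs ++ [cur]) rfl

lemma B_fold (ys : List (String × String)) : ∀ (pieces : List String) (cur : String × String),
    (let st := ys.foldl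
        (fun (s : List String × String × String) te =>
          if te.2 == s.2.2 then (s.1, s.2.1 ++ " " ++ te.1, s.2.2)
          else (s.1 ++ [wrapTag s.2.1 s.2.2], te.1, te.2))
        (pieces, cur.1, cur.2);
      st.1 ++ [wrapTag st.2.1 st.2.2])
    = pieces ++ (groupsGo cur ys).map (fun p => wrapTag p.1 p.2) := by
  induction ys with
  | nil => intro pieces cur; simp [groupsGo]
  | cons te ys ih =>
    obtain ⟨t, e⟩ := te
    intro pieces cur
    by_cases h : e = cur.2
    · simpa [groupsGo, h] using ih pieces (cur.1 ++ " " ++ t, cur.2)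
    · simpa [groupsGo, h] using ih (pieces ++ [wrapTag cur.1 cur.2]) (t, e)

lemma range_map_getD (all : List (String × String)) :
    (List.range all.length).map (fun k => wrapTag (all.getD k ("", "")).1 (all.getD k ("", "")).2)
    = all.map (fun p => wrapTag p.1 p.2) := by
  apply List.ext_getElem
  · simp
  · intro i h1 h2
    simp [List.getD_eq_getElem?_getD]
    simp at h2
    simp [List.getElem?_eq_getElem h2]

lemma secondLoop_eq (all : List (String × String)) :
    (PySem.List.pyRange 0 (((dOf (all.map (·.1))).size : Int))).foldl
      (fun (acc : List String) k =>
        if (["Person", "Organization", "Location"] : List String).contains ((dOf (all.map (fun p => pyCapitalize p.2))).getD k "") then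
          acc ++ ["<" ++ (dOf (all.map (fun p => pyCapitalize p.2))).getD k "" ++ ">" ++ (dOf (all.map (·.1))).getD k "" ++ "</" ++ (dOf (all.map (fun p => pyCapitalize p.2))).getD k "" ++ ">"]
        else
          acc ++ [(dOf (all.map (·.1))).getD k ""])
      []
    = all.map (fun p => wrapTag p.1 p.2) := by
  rw [size_dOf, List.length_map, PySem.List.pyRange_zero, Int.toNat_natCast, List.foldl_map]
  rw [PySem.List.foldl_congr_mem _ _
      (fun acc (k : Nat) => acc ++ [wrapTag (all.getD k ("", "")).1 (all.getD k ("", "")).2]) _ ?_]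
  · rw [PySem.List.foldl_append_singleton_eq_map, List.nil_append, range_map_getD]
  · intro acc k hk
    rw [List.mem_range] at hk
    have h1 : (dOf (all.map (·.1))).getD ((k : Nat) : Int) "" = (all.getD k ("", "")).1 := by
      rw [getD_dOf]
      simp [List.getD_eq_getElem?_getD, List.getElem?_map, List.getElem?_eq_getElem hk]
    have h2 : (dOf (all.map (fun p => pyCapitalize p.2))).getD ((k : Nat) : Int) "" = pyCapitalize (all.getD k ("", "")).2 := by
      rw [getD_dOf]
      simp [List.getD_eq_getElem?_getD, List.getElem?_map, List.getElem?_eq_getElem hk]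
    rw [h1, h2]
    simp only [wrapTag]
    split <;> simp_all


lemma stateOf_init (t0 e0 : String) (rest : List (String × String)) :
    ((0 : Int), (PySem.Dict.empty : PySem.Dict Int String).insert 0 (PySem.List.pyGetD (((t0, e0) :: rest).map Prod.fst) 0 ""),
      (PySem.Dict.empty : PySem.Dict Int String).insert 0 (pyCapitalize (PySem.List.pyGetD (((t0, e0) :: rest).map Prod.snd) 0 "")))
    = stateOf [(t0, e0)] := by
  rw [PySem.List.pyGetD_ofNat', PySem.List.pyGetD_ofNat']
  rfl

lemma A_eq (t0 e0 : String) (rest : List (String × String)) :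
    format_tagged_tokens_py ((t0, e0) :: rest)
    = PySem.Str.join " " ((groupsGo (t0, e0) rest).map (fun p => wrapTag p.1 p.2)) := by
  have hst :
      (PySem.List.pyRange 1 (PySem.List.len (((t0, e0) :: rest).map Prod.fst))).foldl
        (fun (s : Int × PySem.Dict Int String × PySem.Dict Int String) j =>
          if PySem.List.pyGetD (((t0, e0) :: rest).map Prod.snd) j "" == PySem.List.pyGetD (((t0, e0) :: rest).map Prod.snd) (j - 1) "" then
            (s.1, s.2.1.insert s.1 (s.2.1.getD s.1 "" ++ " " ++ PySem.List.pyGetD (((t0, e0) :: rest).map Prod.fst) j ""), s.2.2)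
          else
            (s.1 + 1, s.2.1.insert (s.1 + 1) (PySem.List.pyGetD (((t0, e0) :: rest).map Prod.fst) j ""),
              s.2.2.insert (s.1 + 1) (pyCapitalize (PySem.List.pyGetD (((t0, e0) :: rest).map Prod.snd) j ""))))
        ((0 : Int), (PySem.Dict.empty : PySem.Dict Int String).insert 0 (PySem.List.pyGetD (((t0, e0) :: rest).map Prod.fst) 0 ""),
          (PySem.Dict.empty : PySem.Dict Int String).insert 0 (pyCapitalize (PySem.List.pyGetD (((t0, e0) :: rest).map Prod.snd) 0 "")))
      = stateOf (groupsGo (t0, e0) rest) := by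
    rw [stateOf_init]
    -- the step only reads components of the pair list: fold with stepA on (element, previous element)
    have hcong : ∀ (acc : Int × PySem.Dict Int String × PySem.Dict Int String),
        ∀ j ∈ PySem.List.pyRange 1 (PySem.List.len (((t0, e0) :: rest).map Prod.fst)),
        (if PySem.List.pyGetD (((t0, e0) :: rest).map Prod.snd) j "" == PySem.List.pyGetD (((t0, e0) :: rest).map Prod.snd) (j - 1) "" then
            (acc.1, acc.2.1.insert acc.1 (acc.2.1.getD acc.1 "" ++ " " ++ PySem.List.pyGetD (((t0, e0) :: rest).map Prod.fst) j ""), acc.2.2)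
          else
            (acc.1 + 1, acc.2.1.insert (acc.1 + 1) (PySem.List.pyGetD (((t0, e0) :: rest).map Prod.fst) j ""),
              acc.2.2.insert (acc.1 + 1) (pyCapitalize (PySem.List.pyGetD (((t0, e0) :: rest).map Prod.snd) j ""))))
        = stepA acc (PySem.List.pyGetD ((t0, e0) :: rest) j ("", "")) (PySem.List.pyGetD ((t0, e0) :: rest) (j - 1) ("", "")) := by
      intro acc j _
      have hf : ∀ (i : Int), PySem.List.pyGetD (((t0, e0) :: rest).map Prod.fst) i "" = (PySem.List.pyGetD ((t0, e0) :: rest) i ("", "")).1 :=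
        fun i => PySem.List.pyGetD_map Prod.fst _ i ("", "")
      have hs : ∀ (i : Int), PySem.List.pyGetD (((t0, e0) :: rest).map Prod.snd) i "" = (PySem.List.pyGetD ((t0, e0) :: rest) i ("", "")).2 :=
        fun i => PySem.List.pyGetD_map Prod.snd _ i ("", "")
      rw [hf, hs, hs]
      rfl
    rw [PySem.List.foldl_congr_mem _ _ _ _ hcong]
    have hlen : PySem.List.len (((t0, e0) :: rest).map Prod.fst) = ((((t0, e0) :: rest).length : Nat) : Int) := by
      simp [PySem.List.len]
    rw [hlen, foldl_pyRange_prev stepA ("", "") rest (t0, e0) (stateOf [(t0, e0)])]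
    have := foldPrev_stepA rest (t0, e0) (t0, e0) [] rfl
    simpa using this
  simp only [format_tagged_tokens_py]
  rw [hst]
  simp only [stateOf]
  rw [secondLoop_eq]

-- ===== VERDICT (by name: the statement is the Claim_ definition above) =====
theorem format_tagged_tokens_py_spec : Claim_equal_format_tagged_tokens_py := by
  intro tuple_list _ hpre
  unfold Spec_format_tagged_tokens_py
  cases tuple_list with
  | nil => exact absurd rfl hpre
  | cons hd rest =>
    obtain ⟨t0, e0⟩ := hd
    -- B's side: the single pass produces the wrapped runs
    have hB : format_tagged_tokens_py_alt ((t0, e0) :: rest)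
        = PySem.Str.join " " ((groupsGo (t0, e0) rest).map (fun p => wrapTag p.1 p.2)) := by
      have h := B_fold rest [] (t0, e0)
      simp only at h
      exact congrArg (PySem.Str.join " ") h
    rw [hB, A_eq]
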